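-- pv_equiv track=rewrite | github.com/argamanza/Wiki7 | data/data_pipeline/helpers.py | _greedy_country_match
-- ===== SOURCE A (Python) =====
-- from typing import List, Optional, Set
--
-- def _greedy_country_match(text: str, country_variants: Set[str]) -> List[str]:
--     text_lower = text.lower()
--     found_countries = []
--     sorted_variants = sorted(country_variants, key=len, reverse=True)
--     used_positions = set()
--
--     for variant in sorted_variants:
--         start = 0
--         while True:
--             pos = text_lower.find(variant, start)
--             if pos == -1:
--                 break
--
--             end_pos = pos + len(variant)
--
--             if any(i in used_positions for i in range(pos, end_pos)):
--                 start = pos + 1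
--                 continue
--
--             if _is_valid_word_boundary(text_lower, pos, end_pos):
--                 used_positions.update(range(pos, end_pos))
--                 original_case = text[pos:end_pos]
--                 found_countries.append((pos, original_case))
--
--             start = pos + 1
--
--     found_countries.sort(key=lambda x: x[0])
--     return [country for _, country in found_countries]
--
-- def _is_valid_word_boundary(text: str, start: int, end: int) -> bool:
--     if start > 0 and text[start - 1].isalnum():
--         return False
--     if end < len(text) and text[end].isalnum():
--         return False
--     return True
-- ===== SOURCE B (Python) =====
-- # B: one position-major scan over the lowered text builds an inverted index
-- # (matched substring -> ascending position list) via set lookups over the distinct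
-- # variant lengths, replacing A's per-variant find() scans of the text; a greedy
-- # consumption pass then walks variants longest-first (lexicographic tie-break)
-- # over their precomputed positions, checking and marking occupation by slicing
-- # an occupied-cell array.
--
-- def _is_valid_word_boundary(text, start, end):
--     if start > 0 and text[start - 1].isalnum():
--         return False
--     if end < len(text) and text[end].isalnum():
--         return False
--     return True
--
--
-- def _greedy_country_match(text, country_variants):
--     tl = text.lower()
--     n = len(tl)
--     vset = set(country_variants)
--     lengths = sorted({len(v) for v in vset})
--     index = {}
--     for p in range(n + 1):
--         for L in lengths:
--             s = tl[p:p + L]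
--             if len(s) == L and s in vset:
--                 index.setdefault(s, []).append(p)
--     occupied = [False] * n
--     found = []
--     for v in sorted(sorted(vset), key=len, reverse=True):
--         for p in index.get(v, []):
--             e = p + len(v)
--             if any(occupied[p:e]):
--                 continue
--             if _is_valid_word_boundary(tl, p, e):
--                 for i in range(p, e):
--                     occupied[i] = True
--                 found.append((p, text[p:e]))
--     found.sort(key=lambda x: x[0])
--     return [c for _, c in found]
-- ===== Notes on version B (the rewrite author's own statement) =====
-- stated objective: faster
-- what changed: B replaces A's per-variant find() scans of the text by a single position-major scan that builds an inverted index (matched substring -> ascending position list) via set lookups over the distinct variant lengths; a greedy pass then consumes each variant's precomputed positions longest-first, checking and marking an occupied-cell array by slices, with a pinned lexicographic tie-break among equal-length variants.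
-- outside the precondition, e.g. on _greedy_country_match(' ba  ab ', {'ab ', ' ab'}): A returns ['ab '], B returns [' ab']
import Mathlib
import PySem

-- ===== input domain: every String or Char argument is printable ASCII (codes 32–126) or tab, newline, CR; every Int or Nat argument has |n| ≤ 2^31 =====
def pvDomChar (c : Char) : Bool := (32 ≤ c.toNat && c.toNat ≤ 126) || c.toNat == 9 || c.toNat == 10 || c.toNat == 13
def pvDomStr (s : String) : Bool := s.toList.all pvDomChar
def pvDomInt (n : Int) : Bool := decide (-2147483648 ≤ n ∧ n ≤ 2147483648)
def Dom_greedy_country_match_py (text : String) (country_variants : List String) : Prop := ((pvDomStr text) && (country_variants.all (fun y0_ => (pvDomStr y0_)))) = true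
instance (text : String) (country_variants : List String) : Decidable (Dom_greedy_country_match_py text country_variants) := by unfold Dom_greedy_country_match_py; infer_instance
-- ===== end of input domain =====

-- B replaces A's per-variant find() scans of the text by one position-major scan that
-- builds an inverted index (matched substring -> ascending position list) via set lookups
-- over the distinct variant lengths, then a greedy longest-first pass over the
-- precomputed positions (objective: faster; a timing run measured B faster at the
-- largest size).
-- Python A receives a SET of variants: its tie order among equal-length variants is hash
-- order, which is not modelled; both ports canonicalise the set lexicographically, and
-- Pre_ restricts the claim to inputs whose result cannot depend on that tie order.

-- ===== PORT A =====
-- shared helper: _is_valid_word_boundary (both Pythons call it; at every call site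
-- 0 < s → s-1 < len and e < len are guarded, so getD is exact for Python's indexing)
def pvBoundary (t : List Char) (s e : Nat) : Bool :=
  if decide (0 < s) && PySem.Chars.isalnum (t.getD (s - 1) ' ') then false
  else if decide (e < t.length) && PySem.Chars.isalnum (t.getD e ' ') then false
  else true

-- the body of A's while-loop at a found position pos (state = (used_positions, found))
def pvStepA (textL tl v : List Char) (st : PySem.Set Nat × List (Nat × List Char)) (pos : Nat) :
    PySem.Set Nat × List (Nat × List Char) :=
  if (List.range' pos v.length).any (fun i => PySem.Set.contains st.1 i) then st
  else if pvBoundary tl pos (pos + v.length) then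
    ((List.range' pos v.length).foldl PySem.Set.add st.1,
     st.2 ++ [(pos, PySem.List.slice textL (some (pos : Int)) (some ((pos + v.length : Nat) : Int)))])
  else st

-- findFrom's result is an index ≥ start and ≤ |tl| (used by the loop's termination)
theorem pvFindFrom_bounds (tl v : List Char) (start : Nat)
    (h : PySem.Chars.findFrom tl v (start : Int) none ≠ -1) :
    start ≤ tl.length ∧ start ≤ (PySem.Chars.findFrom tl v (start : Int) none).toNat := by
  by_cases hs : start ≤ tl.length
  · have spec := PySem.Chars.findFrom_natCast_spec tl v start hs h
    exact ⟨hs, by omega⟩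
  · exfalso
    apply h
    simp [PySem.Chars.findFrom]
    omega

-- A's inner 'while True: pos = text_lower.find(variant, start); …; start = pos + 1'
def pvLoopA (textL tl v : List Char) (start : Nat) (st : PySem.Set Nat × List (Nat × List Char)) :
    PySem.Set Nat × List (Nat × List Char) :=
  if h : PySem.Chars.findFrom tl v (start : Int) none = -1 then st
  else
    let pos := (PySem.Chars.findFrom tl v (start : Int) none).toNat
    pvLoopA textL tl v (pos + 1) (pvStepA textL tl v st pos)
termination_by tl.length + 1 - start
decreasing_by
  have := pvFindFrom_bounds tl v start h
  omega

def greedy_country_match_py (text : String) (country_variants : List String) : List String :=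
  let textL := text.toList
  let tl := PySem.Chars.lower textL
  -- sorted(country_variants, key=len, reverse=True) over a SET: canonicalised tie order
  let sortedV := PySem.List.sorted (PySem.List.sorted country_variants (fun v => v) false)
      (fun v => PySem.Str.len v) true
  let res := sortedV.foldl (fun st v => pvLoopA textL tl v.toList 0 st)
      ((PySem.Set.empty : PySem.Set Nat), ([] : List (Nat × List Char)))
  (PySem.List.sorted res.2 (fun x => x.1) false).map (fun x => String.ofList x.2)

-- ===== PORT B =====
-- one index-building step: p fixed, one candidate length L
-- ('s = tl[p:p+L]; if len(s) == L and s in vset: index[s] = index.get(s, []) + [p]')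
def pvIdxStep (tl : List Char) (vset : PySem.Set String) (p : Nat)
    (d2 : PySem.Dict String (List Nat)) (L : Nat) : PySem.Dict String (List Nat) :=
  let s := PySem.List.slice tl (some (p : Int)) (some ((p + L : Nat) : Int))
  if s.length == L && PySem.Set.contains vset (String.ofList s) then
    PySem.Dict.insert d2 (String.ofList s) (PySem.Dict.getD d2 (String.ofList s) [] ++ [p])
  else d2

-- the body of B's greedy pass over one candidate (p, m); state = (occupied, found)
def pvStepB (textL tl : List Char) (st : List Bool × List (Nat × List Char)) (c : Nat × Nat) :
    List Bool × List (Nat × List Char) :=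
  if (PySem.List.slice st.1 (some (c.1 : Int)) (some ((c.1 + c.2 : Nat) : Int))).any (fun b => b) then st
  else if pvBoundary tl c.1 (c.1 + c.2) then
    ((List.range' c.1 c.2).foldl (fun oc i => oc.set i true) st.1,
     st.2 ++ [(c.1, PySem.List.slice textL (some (c.1 : Int)) (some ((c.1 + c.2 : Nat) : Int)))])
  else st

def greedy_country_match_py_alt (text : String) (country_variants : List String) : List String :=
  let textL := text.toList
  let tl := PySem.Chars.lower textL
  let n := tl.length
  let vset : PySem.Set String := PySem.Set.ofList country_variants
  let lengths : List Nat :=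
    PySem.List.sorted (PySem.Set.ofList (vset.map (fun v => v.toList.length))) (fun x => x) false
  let index :=
    (List.range (n + 1)).foldl (fun d p => lengths.foldl (pvIdxStep tl vset p) d)
      (PySem.Dict.empty : PySem.Dict String (List Nat))
  let sortedV := PySem.List.sorted (PySem.List.sorted vset (fun v => v) false)
      (fun v => PySem.Str.len v) true
  let found := sortedV.foldl (fun st v =>
      (PySem.Dict.getD index v []).foldl (fun st2 p => pvStepB textL tl st2 (p, v.toList.length)) st)
      ((List.replicate n false, ([] : List (Nat × List Char))))
  (PySem.List.sorted found.2 (fun x => x.1) false).map (fun x => String.ofList x.2)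

-- ===== PRECONDITION & SPEC =====
-- The parameter is a Python SET of variants: its list form holds distinct elements (first
-- conjunct), and Pre_ additionally excludes inputs where two distinct equal-length variants
-- have overlapping occurrences in the lowercased text: there A's result depends on Python's
-- hash-seeded set iteration order among sort ties (an accidental tie order no one would
-- specify), while B pins a lexicographic tie-break.
def Pre_greedy_country_match_py (text : String) (country_variants : List String) : Prop :=
  country_variants.Nodup ∧
  ∀ u ∈ country_variants, ∀ v ∈ country_variants, u ≠ v → u.toList.length = v.toList.length →
    ∀ p ∈ List.range (text.toList.length + 1), ∀ q ∈ List.range (text.toList.length + 1),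
      u.toList <+: (PySem.Chars.lower text.toList).drop p →
      v.toList <+: (PySem.Chars.lower text.toList).drop q →
      p + u.toList.length ≤ q ∨ q + v.toList.length ≤ p
instance (text : String) (country_variants : List String) : Decidable (Pre_greedy_country_match_py text country_variants) := by unfold Pre_greedy_country_match_py; infer_instance

def pvWitness_greedy_country_match_py : String × List String :=
  ("Israel and France", ["israel", "france"])

def Spec_greedy_country_match_py (text : String) (country_variants : List String) (out : List String) : Prop := out = greedy_country_match_py_alt text country_variants
instance (text : String) (country_variants : List String) (out : List String) : Decidable (Spec_greedy_country_match_py text country_variants out) := by unfold Spec_greedy_country_match_py; infer_instance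

-- ===== CLAIM (what is proved, stated in full; the proofs are below) =====
def Claim_equal_greedy_country_match_py : Prop := ∀ (text : String) (country_variants : List String), Dom_greedy_country_match_py text country_variants → Pre_greedy_country_match_py text country_variants → Spec_greedy_country_match_py text country_variants (greedy_country_match_py text country_variants)

-- ===== LEMMAS AND PROOFS =====

-- occurrence positions of variant v in tl, shared yardstick of both reductions
def pvOcc (tl v : List Char) : List Nat :=
  (List.range (tl.length + 1 - v.length)).filter
    (fun p => decide (PySem.List.slice tl (some (p : Int)) (some ((p + v.length : Nat) : Int)) = v))

theorem pvOcc_mem (tl v : List Char) (p : Nat) :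
    p ∈ pvOcc tl v ↔ p ≤ tl.length ∧ v <+: tl.drop p := by
  simp only [pvOcc, List.mem_filter, List.mem_range, PySem.List.slice_natCast,
    Nat.add_sub_cancel_left, decide_eq_true_eq]
  constructor
  · rintro ⟨h1, h2⟩
    refine ⟨by omega, ?_⟩
    rw [List.prefix_iff_eq_take]
    exact h2.symm
  · rintro ⟨h1, h2⟩
    have hl := h2.length_le
    simp only [List.length_drop] at hl
    refine ⟨by omega, ?_⟩
    rw [List.prefix_iff_eq_take] at h2
    exact h2.symm

theorem pvOcc_pairwise (tl v : List Char) : (pvOcc tl v).Pairwise (· < ·) :=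
  List.Pairwise.sublist List.filter_sublist List.pairwise_lt_range

theorem pv_filter_ge_split (l : List Nat) (hs : l.Pairwise (· < ·)) (start r : Nat)
    (hr : r ∈ l) (hsr : start ≤ r) (hmin : ∀ p ∈ l, start ≤ p → r ≤ p) :
    l.filter (fun p => start ≤ p) = r :: l.filter (fun p => r + 1 ≤ p) := by
  induction l with
  | nil => simp at hr
  | cons x t ih =>
    rcases List.mem_cons.1 hr with rfl | hrt
    · have hall : ∀ p ∈ t, r < p := fun p hp => (List.pairwise_cons.1 hs).1 p hp
      simp only [List.filter_cons, decide_eq_true_eq]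
      rw [if_pos (by simpa using hsr), if_neg (by simp)]
      congr 1
      apply List.filter_congr
      intro p hp
      have := hall p hp
      simp only [decide_eq_decide]
      omega
    · have hx : x < r := by
        have := (List.pairwise_cons.1 hs).1 r hrt
        omega
      have hxs : x < start := by
        by_contra hc
        have := hmin x (List.mem_cons_self) (by omega)
        omega
      simp only [List.filter_cons, decide_eq_true_eq]
      rw [if_neg (by simp; omega), if_neg (by simp; omega)]
      exact ih (List.pairwise_cons.1 hs).2 hrt (fun p hp h => hmin p (List.mem_cons_of_mem _ hp) h)

-- A's find loop is the fold of its body over the occurrences ≥ start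
theorem pvLoopA_eq_foldl (textL tl v : List Char) (start : Nat) (st : PySem.Set Nat × List (Nat × List Char)) :
    pvLoopA textL tl v start st =
      ((pvOcc tl v).filter (fun p => start ≤ p)).foldl (pvStepA textL tl v) st := by
  rw [pvLoopA]
  by_cases h : PySem.Chars.findFrom tl v (start : Int) none = -1
  · rw [dif_pos h]
    have hnil : (pvOcc tl v).filter (fun p => start ≤ p) = [] := by
      rw [List.filter_eq_nil_iff]
      intro p hp
      simp only [decide_eq_true_eq]
      intro hsp
      obtain ⟨hpn, hpre⟩ := (pvOcc_mem tl v p).1 hp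
      have hs : start ≤ tl.length := le_trans hsp hpn
      have hni := (PySem.Chars.findFrom_natCast_eq_neg_one_iff tl v start hs).1 h
      apply hni
      have hdd : (tl.drop start).drop (p - start) = tl.drop p := by
        rw [List.drop_drop]
        congr 1
        omega
      rw [← hdd] at hpre
      exact hpre.isInfix.trans (List.drop_suffix _ _).isInfix
    rw [hnil]
    rfl
  · rw [dif_neg h]
    have hb := pvFindFrom_bounds tl v start h
    have spec := PySem.Chars.findFrom_natCast_spec tl v start hb.1 h
    set pos := (PySem.Chars.findFrom tl v (start : Int) none).toNat with hpos
    have hposn : pos ≤ tl.length := by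
      by_contra hc
      have hdnil : tl.drop pos = [] := by
        apply List.drop_eq_nil_of_le
        omega
      have hv : v = [] := by
        have := spec.2.1
        rw [hdnil] at this
        exact List.prefix_nil.1 this
      exact spec.2.2 start le_rfl (by omega) (by simp [hv])
    have hmem : pos ∈ pvOcc tl v := (pvOcc_mem _ _ _).2 ⟨hposn, spec.2.1⟩
    have hmin : ∀ p ∈ pvOcc tl v, start ≤ p → pos ≤ p := by
      intro p hp hsp
      by_contra hc
      exact spec.2.2 p hsp (by omega) ((pvOcc_mem tl v p).1 hp).2
    rw [pv_filter_ge_split (pvOcc tl v) (pvOcc_pairwise tl v) start pos hmem hb.2 hmin,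
      List.foldl_cons]
    exact pvLoopA_eq_foldl textL tl v (pos + 1) (pvStepA textL tl v st pos)
termination_by tl.length + 1 - start
decreasing_by omega

-- B's occupied array read with Python-getD semantics
theorem pvGetD_set (oc : List Bool) (j i : Nat) :
    (oc.set j true).getD i false = if i = j ∧ j < oc.length then true else oc.getD i false := by
  rcases Nat.lt_or_ge i oc.length with h | h
  · rw [List.getD_eq_getElem _ _ (by simpa using h), List.getD_eq_getElem _ _ h, List.getElem_set]
    by_cases he : i = j
    · subst he; rw [if_pos rfl, if_pos ⟨rfl, by omega⟩]
    · rw [if_neg (fun hh => he hh.symm), if_neg (fun hh => he hh.1)]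
  · rw [List.getD_eq_default _ _ (by simpa using h), List.getD_eq_default _ _ h,
      if_neg (fun hh => by omega)]

-- 'any(occupied[p:p+m])' reads exactly the cells p..p+m-1
theorem pvAnySlice (oc : List Bool) (p m : Nat) :
    ((oc.drop p).take m).any (fun b => b) = true ↔
      ∃ i, p ≤ i ∧ i < p + m ∧ oc.getD i false = true := by
  simp only [List.any_eq_true, List.mem_iff_getElem]
  constructor
  · rintro ⟨b, ⟨j, hj, rfl⟩, hb⟩
    have hj' : j < m ∧ p + j < oc.length := by
      simp only [List.length_take, List.length_drop] at hj; omega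
    refine ⟨p + j, by omega, by omega, ?_⟩
    rw [List.getD_eq_getElem _ _ hj'.2]
    simpa [List.getElem_take, List.getElem_drop] using hb
  · rintro ⟨i, h1, h2, h3⟩
    have hi : i < oc.length := by
      by_contra hc
      rw [List.getD_eq_default _ _ (by omega)] at h3
      simp at h3
    refine ⟨true, ⟨i - p, ?_, ?_⟩, rfl⟩
    · simp only [List.length_take, List.length_drop]; omega
    · rw [List.getElem_take, List.getElem_drop]
      rw [List.getD_eq_getElem _ _ hi] at h3
      simpa [Nat.add_sub_cancel' h1] using h3

theorem pvFoldSet_length (l : List Nat) (oc : List Bool) :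
    (l.foldl (fun oc2 j => oc2.set j true) oc).length = oc.length := by
  induction l generalizing oc with
  | nil => rfl
  | cons j t ih => rw [List.foldl_cons, ih, List.length_set]

-- marking the cells p..p+m-1, read back at i
theorem pvSetRange_getD (m p i : Nat) (oc : List Bool) :
    ((List.range' p m).foldl (fun oc2 j => oc2.set j true) oc).getD i false =
      if p ≤ i ∧ i < p + m ∧ i < oc.length then true else oc.getD i false := by
  induction m generalizing p oc with
  | zero =>
    rw [if_neg (fun hh => by omega)]
    rfl
  | succ m ih =>
    rw [List.range'_succ, List.foldl_cons, ih, pvGetD_set, List.length_set]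
    split_ifs with h1 h2 h3 h4 h5 <;> first | rfl | (exfalso; omega)

-- invariant: A's used-position set holds exactly B's occupied cells
def pvInv (u : PySem.Set Nat) (oc : List Bool) : Prop :=
  ∀ i : Nat, i ∈ u ↔ oc.getD i false = true

theorem pvStep_corr (textL tl v : List Char) (p : Nat) (hpm : p + v.length ≤ textL.length)
    (u : PySem.Set Nat) (f : List (Nat × List Char)) (oc : List Bool)
    (hoc : oc.length = textL.length) (hInv : pvInv u oc) :
    (pvStepA textL tl v (u, f) p).2 = (pvStepB textL tl (oc, f) (p, v.length)).2 ∧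
      (pvStepB textL tl (oc, f) (p, v.length)).1.length = textL.length ∧
      pvInv (pvStepA textL tl v (u, f) p).1 (pvStepB textL tl (oc, f) (p, v.length)).1 := by
  have hAB : (List.range' p v.length).any (fun i => PySem.Set.contains u i) =
      (PySem.List.slice oc (some (p : Int)) (some ((p + v.length : Nat) : Int))).any (fun b => b) := by
    apply Bool.coe_iff_coe.mp
    simp only [PySem.List.slice_natCast, Nat.add_sub_cancel_left]
    rw [pvAnySlice oc p v.length]
    simp only [List.any_eq_true, List.mem_range'_1, PySem.Set.contains_iff]
    constructor
    · rintro ⟨i, ⟨h1, h2⟩, h3⟩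
      exact ⟨i, h1, by omega, (hInv i).1 h3⟩
    · rintro ⟨i, h1, h2, h3⟩
      exact ⟨i, ⟨h1, by omega⟩, (hInv i).2 h3⟩
  simp only [pvStepA, pvStepB, hAB]
  by_cases hov : (PySem.List.slice oc (some (p : Int)) (some ((p + v.length : Nat) : Int))).any
      (fun b => b) = true
  · rw [if_pos hov, if_pos hov]
    exact ⟨rfl, hoc, hInv⟩
  · rw [if_neg hov, if_neg hov]
    by_cases hbd : pvBoundary tl p (p + v.length) = true
    · rw [if_pos hbd, if_pos hbd]
      refine ⟨rfl, ?_, ?_⟩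
      · rw [pvFoldSet_length]
        exact hoc
      · intro i
        have hmem : i ∈ (List.range' p v.length).foldl PySem.Set.add u ↔
            i ∈ u ∨ ∃ b ∈ List.range' p v.length, i = b := by
          exact PySem.Set.mem_foldl_add (f := fun b => b) (l := List.range' p v.length) (s := u) (y := i)
        rw [hmem, pvSetRange_getD]
        simp only [List.mem_range'_1]
        by_cases hin : p ≤ i ∧ i < p + v.length
        · rw [if_pos ⟨hin.1, hin.2, by omega⟩]
          simp only [iff_true]
          exact Or.inr ⟨i, ⟨hin.1, by omega⟩, rfl⟩
        · rw [if_neg (fun hh => hin ⟨hh.1, hh.2.1⟩)]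
          rw [← hInv i]
          constructor
          · rintro (h | ⟨b, ⟨hb1, hb2⟩, rfl⟩)
            · exact h
            · exact absurd ⟨hb1, by omega⟩ hin
          · exact Or.inl
    · rw [if_neg hbd, if_neg hbd]
      exact ⟨rfl, hoc, hInv⟩

theorem pvFold_corr (textL tl v : List Char) (ps : List Nat)
    (hps : ∀ p ∈ ps, p + v.length ≤ textL.length)
    (u : PySem.Set Nat) (f : List (Nat × List Char)) (oc : List Bool)
    (hoc : oc.length = textL.length) (hInv : pvInv u oc) :
    (ps.foldl (pvStepA textL tl v) (u, f)).2 =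
      ((ps.map (fun p => (p, v.length))).foldl (pvStepB textL tl) (oc, f)).2 ∧
      ((ps.map (fun p => (p, v.length))).foldl (pvStepB textL tl) (oc, f)).1.length = textL.length ∧
      pvInv (ps.foldl (pvStepA textL tl v) (u, f)).1
        ((ps.map (fun p => (p, v.length))).foldl (pvStepB textL tl) (oc, f)).1 := by
  induction ps generalizing u f oc with
  | nil => exact ⟨rfl, hoc, hInv⟩
  | cons p ps ih =>
    simp only [List.foldl_cons, List.map_cons]
    obtain ⟨h2, hlen, hInv'⟩ := pvStep_corr textL tl v p (hps p List.mem_cons_self) u f oc hoc hInv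
    have ih' := ih (fun q hq => hps q (List.mem_cons_of_mem _ hq))
      (pvStepA textL tl v (u, f) p).1 (pvStepA textL tl v (u, f) p).2
      (pvStepB textL tl (oc, f) (p, v.length)).1 hlen hInv'
    rw [Prod.mk.eta] at ih'
    rw [h2] at ih'
    rw [Prod.mk.eta] at ih'
    exact ih'

theorem pvOuter_corr (textL tl : List Char) (htl : tl.length = textL.length) (vs : List String)
    (u : PySem.Set Nat) (f : List (Nat × List Char)) (oc : List Bool)
    (hoc : oc.length = textL.length) (hInv : pvInv u oc) :
    (vs.foldl (fun st v => pvLoopA textL tl v.toList 0 st) (u, f)).2 =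
      ((vs.flatMap (fun v => (pvOcc tl v.toList).map (fun p => (p, v.toList.length)))).foldl
        (pvStepB textL tl) (oc, f)).2 ∧
      ((vs.flatMap (fun v => (pvOcc tl v.toList).map (fun p => (p, v.toList.length)))).foldl
        (pvStepB textL tl) (oc, f)).1.length = textL.length ∧
      pvInv (vs.foldl (fun st v => pvLoopA textL tl v.toList 0 st) (u, f)).1
        ((vs.flatMap (fun v => (pvOcc tl v.toList).map (fun p => (p, v.toList.length)))).foldl
          (pvStepB textL tl) (oc, f)).1 := by
  induction vs generalizing u f oc with
  | nil => exact ⟨rfl, hoc, hInv⟩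
  | cons w vs ih =>
    simp only [List.foldl_cons, List.flatMap_cons, List.foldl_append]
    have hfilter : (pvOcc tl w.toList).filter (fun p => 0 ≤ p) = pvOcc tl w.toList :=
      List.filter_eq_self.mpr (fun a _ => by simp)
    have hloop := pvLoopA_eq_foldl textL tl w.toList 0 (u, f)
    rw [hfilter] at hloop
    have hps : ∀ p ∈ pvOcc tl w.toList, p + w.toList.length ≤ textL.length := by
      intro p hp
      obtain ⟨hpn, hpre⟩ := (pvOcc_mem tl w.toList p).1 hp
      have := hpre.length_le
      simp only [List.length_drop] at this
      omega
    obtain ⟨h2, hlen, hInv'⟩ := pvFold_corr textL tl w.toList (pvOcc tl w.toList) hps u f oc hoc hInv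
    rw [← hloop] at h2 hInv'
    have ih' := ih (pvLoopA textL tl w.toList 0 (u, f)).1 (pvLoopA textL tl w.toList 0 (u, f)).2
      (((pvOcc tl w.toList).map (fun p => (p, w.toList.length))).foldl (pvStepB textL tl) (oc, f)).1
      hlen hInv'
    rw [Prod.mk.eta] at ih'
    rw [h2] at ih'
    rw [Prod.mk.eta] at ih'
    exact ih'

-- ===== B-side: the inverted index holds exactly pvOcc for every variant of the set =====

-- an index step at a length other than |v| never touches key v
theorem pvIdxStep_getD_ne (tl : List Char) (vset : PySem.Set String) (p : Nat)
    (d2 : PySem.Dict String (List Nat)) (L : Nat) (v : String) (hL : L ≠ v.toList.length) :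
    PySem.Dict.getD (pvIdxStep tl vset p d2 L) v [] = PySem.Dict.getD d2 v [] := by
  simp only [pvIdxStep]
  split
  · next hc =>
    simp only [Bool.and_eq_true, beq_iff_eq] at hc
    apply PySem.Dict.getD_insert_of_ne
    intro he
    apply hL
    have h3 := congrArg String.toList he
    rw [String.toList_ofList] at h3
    have h4 : v.toList.length = L := by rw [h3]; exact hc.1
    exact h4.symm
  · rfl

-- the index step at length |v|: key v gains p exactly when v occurs at p
theorem pvIdxStep_getD_eq (tl : List Char) (vset : PySem.Set String) (p : Nat)
    (d2 : PySem.Dict String (List Nat)) (v : String) (hv : PySem.Set.contains vset v = true) :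
    PySem.Dict.getD (pvIdxStep tl vset p d2 v.toList.length) v [] =
      PySem.Dict.getD d2 v [] ++
        (if PySem.List.slice tl (some (p : Int)) (some ((p + v.toList.length : Nat) : Int)) = v.toList
         then [p] else []) := by
  simp only [pvIdxStep]
  by_cases hs : PySem.List.slice tl (some (p : Int)) (some ((p + v.toList.length : Nat) : Int)) = v.toList
  · rw [if_pos hs, hs]
    simp only [String.ofList_toList, beq_self_eq_true, Bool.true_and, PySem.Set.contains_eq_listContains]
    rw [if_pos (show List.contains vset v = true by
      simpa only [PySem.Set.contains_eq_listContains] using hv)]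
    simp only [PySem.Dict.getD_insert_self]
  · rw [if_neg hs, List.append_nil]
    split
    · next hc =>
      simp only [Bool.and_eq_true, beq_iff_eq] at hc
      apply PySem.Dict.getD_insert_of_ne
      intro he
      apply hs
      have h3 := congrArg String.toList he
      rw [String.toList_ofList] at h3
      exact h3.symm
    · rfl

-- folding the index step over lengths avoiding |v| keeps key v unchanged
theorem pvIdxFold_getD_not_mem (tl : List Char) (vset : PySem.Set String) (p : Nat)
    (lengths : List Nat) (v : String) (h : v.toList.length ∉ lengths)
    (d : PySem.Dict String (List Nat)) :
    PySem.Dict.getD (lengths.foldl (pvIdxStep tl vset p) d) v [] = PySem.Dict.getD d v [] := by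
  induction lengths generalizing d with
  | nil => rfl
  | cons L rest ih =>
    rw [List.foldl_cons, ih (fun hm => h (List.mem_cons_of_mem _ hm)),
      pvIdxStep_getD_ne tl vset p d L v (fun he => h (he ▸ List.mem_cons_self))]

-- one full inner fold (all candidate lengths at position p), read at key v
theorem pvIdxFold_getD (tl : List Char) (vset : PySem.Set String) (p : Nat)
    (lengths : List Nat) (v : String) (hv : PySem.Set.contains vset v = true)
    (hnd : lengths.Nodup) (hm : v.toList.length ∈ lengths) (d : PySem.Dict String (List Nat)) :
    PySem.Dict.getD (lengths.foldl (pvIdxStep tl vset p) d) v [] =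
      PySem.Dict.getD d v [] ++
        (if PySem.List.slice tl (some (p : Int)) (some ((p + v.toList.length : Nat) : Int)) = v.toList
         then [p] else []) := by
  induction lengths generalizing d with
  | nil => simp at hm
  | cons L rest ih =>
    rw [List.foldl_cons]
    by_cases hL : L = v.toList.length
    · subst hL
      rw [pvIdxFold_getD_not_mem tl vset p rest v (List.nodup_cons.1 hnd).1 _,
        pvIdxStep_getD_eq tl vset p d v hv]
    · rcases List.mem_cons.1 hm with he | hrest
      · exact absurd he.symm hL
      · rw [ih (List.nodup_cons.1 hnd).2 hrest, pvIdxStep_getD_ne tl vset p d L v hL]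

-- the whole build over positions 0..k-1, read at key v: the matching positions in order
theorem pvIdxBuild_getD (tl : List Char) (vset : PySem.Set String)
    (lengths : List Nat) (v : String) (hv : PySem.Set.contains vset v = true)
    (hnd : lengths.Nodup) (hm : v.toList.length ∈ lengths) (k : Nat) :
    PySem.Dict.getD
      ((List.range k).foldl (fun d p => lengths.foldl (pvIdxStep tl vset p) d)
        (PySem.Dict.empty : PySem.Dict String (List Nat))) v [] =
      (List.range k).filter
        (fun (p : Nat) => decide (PySem.List.slice tl (some (p : Int))
          (some ((p + v.toList.length : Nat) : Int)) = v.toList)) := by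
  induction k with
  | zero => simp [PySem.Dict.getD_empty]
  | succ k ih =>
    rw [List.range_succ, List.foldl_append, List.foldl_cons, List.foldl_nil,
      pvIdxFold_getD tl vset k lengths v hv hnd hm, ih, List.filter_append]
    simp only [List.filter_cons, List.filter_nil]
    split <;> simp_all

-- matches found by slicing at every p ≤ |tl| are exactly pvOcc (a too-short tail slice
-- can never equal v, so the extra positions contribute nothing)
theorem pvFilter_range_eq_pvOcc (tl v : List Char) :
    (List.range (tl.length + 1)).filter
        (fun (p : Nat) => decide (PySem.List.slice tl (some (p : Int))
          (some ((p + v.length : Nat) : Int)) = v)) = pvOcc tl v := by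
  by_cases h : v.length ≤ tl.length
  · rw [show tl.length + 1 = (tl.length + 1 - v.length) + v.length by omega, List.range_add,
      List.filter_append]
    have h2 : ((List.range v.length).map (fun i => tl.length + 1 - v.length + i)).filter
        (fun (p : Nat) => decide (PySem.List.slice tl (some (p : Int))
          (some ((p + v.length : Nat) : Int)) = v)) = [] := by
      rw [List.filter_eq_nil_iff]
      intro p hp
      simp only [List.mem_map, List.mem_range] at hp
      obtain ⟨i, hi, rfl⟩ := hp
      simp only [decide_eq_true_eq]
      intro hs
      have hlen := congrArg List.length hs
      simp only [PySem.List.slice_natCast, Nat.add_sub_cancel_left, List.length_take,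
        List.length_drop] at hlen
      omega
    rw [h2, List.append_nil]
    rfl
  · have h0 : tl.length + 1 - v.length = 0 := by omega
    rw [pvOcc, h0]
    simp only [List.range_zero, List.filter_nil]
    rw [List.filter_eq_nil_iff]
    intro p hp
    simp only [List.mem_range] at hp
    simp only [decide_eq_true_eq]
    intro hs
    have hlen := congrArg List.length hs
    simp only [PySem.List.slice_natCast, Nat.add_sub_cancel_left, List.length_take,
      List.length_drop] at hlen
    omega

-- the finished index, read at any variant of the set: exactly its occurrence list
theorem pvIndex_getD (tl : List Char) (vset : PySem.Set String)
    (lengths : List Nat) (v : String) (hv : PySem.Set.contains vset v = true)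
    (hnd : lengths.Nodup) (hm : v.toList.length ∈ lengths) :
    PySem.Dict.getD
      ((List.range (tl.length + 1)).foldl (fun d p => lengths.foldl (pvIdxStep tl vset p) d)
        (PySem.Dict.empty : PySem.Dict String (List Nat))) v [] = pvOcc tl v.toList := by
  rw [pvIdxBuild_getD tl vset lengths v hv hnd hm (tl.length + 1)]
  exact pvFilter_range_eq_pvOcc tl v.toList

-- B's greedy pass over the index is the single fold over the variant-major candidates
theorem pvFound_eq (textL tl : List Char) (sortedV : List String)
    (index : PySem.Dict String (List Nat))
    (hidx : ∀ v ∈ sortedV, PySem.Dict.getD index v [] = pvOcc tl v.toList)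
    (init : List Bool × List (Nat × List Char)) :
    sortedV.foldl (fun st v =>
        (PySem.Dict.getD index v []).foldl (fun st2 p => pvStepB textL tl st2 (p, v.toList.length)) st)
      init =
    (sortedV.flatMap (fun v => (pvOcc tl v.toList).map (fun p => (p, v.toList.length)))).foldl
      (pvStepB textL tl) init := by
  rw [List.foldl_flatMap]
  apply PySem.List.foldl_congr_mem
  intro acc v hv
  rw [hidx v hv, List.foldl_map]

theorem pv_main (text : String) (country_variants : List String)
    (hnd : country_variants.Nodup) :
    greedy_country_match_py text country_variants =
      greedy_country_match_py_alt text country_variants := by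
  unfold greedy_country_match_py greedy_country_match_py_alt
  have hset : PySem.Set.ofList country_variants = country_variants :=
    PySem.Set.ofList_eq_self_of_nodup country_variants hnd
  simp only [hset]
  have htl : (PySem.Chars.lower text.toList).length = text.toList.length := by
    simp [PySem.Chars.lower]
  have hInv0 : pvInv (PySem.Set.empty : PySem.Set Nat)
      (List.replicate (PySem.Chars.lower text.toList).length false) := by
    intro i
    simp only [PySem.Set.empty, List.not_mem_nil, false_iff, List.getD_eq_getElem?_getD,
      List.getElem?_replicate]
    split <;> simp
  obtain ⟨h2, _, _⟩ := pvOuter_corr text.toList (PySem.Chars.lower text.toList) htl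
    (PySem.List.sorted (PySem.List.sorted country_variants (fun v => v) false)
      (fun v => PySem.Str.len v) true)
    (PySem.Set.empty : PySem.Set Nat) []
    (List.replicate (PySem.Chars.lower text.toList).length false)
    (by rw [List.length_replicate]; exact htl) hInv0
  rw [h2]
  have hidx : ∀ v ∈ PySem.List.sorted (PySem.List.sorted country_variants (fun v => v) false)
      (fun v => PySem.Str.len v) true,
      PySem.Dict.getD
        ((List.range ((PySem.Chars.lower text.toList).length + 1)).foldl
          (fun d p =>
            (PySem.List.sorted (PySem.Set.ofList (country_variants.map (fun v => v.toList.length)))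
              (fun x => x) false).foldl (pvIdxStep (PySem.Chars.lower text.toList) country_variants p) d)
          (PySem.Dict.empty : PySem.Dict String (List Nat))) v []
        = pvOcc (PySem.Chars.lower text.toList) v.toList := by
    intro v hv
    have hperm1 := PySem.List.sorted_perm (PySem.List.sorted country_variants (fun v => v) false)
      (fun v => PySem.Str.len v) true
    have hperm2 := PySem.List.sorted_perm country_variants (fun v => v) false
    have hvc : v ∈ country_variants := hperm2.mem_iff.mp (hperm1.mem_iff.mp hv)
    have hpl := PySem.List.sorted_perm
      (PySem.Set.ofList (country_variants.map (fun v => v.toList.length))) (fun x => x) false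
    apply pvIndex_getD
    · exact (PySem.Set.contains_iff country_variants v).mpr hvc
    · exact hpl.nodup_iff.mpr (PySem.Set.nodup_ofList _)
    · exact hpl.mem_iff.mpr (by
        simp only [PySem.Set.mem_ofList]
        exact List.mem_map.mpr ⟨v, hvc, rfl⟩)
  rw [pvFound_eq _ _ _ _ hidx]

-- ===== VERDICT (by name: the statement is the Claim_ definition above) =====
theorem greedy_country_match_py_spec : Claim_equal_greedy_country_match_py := by
  intro text country_variants _ hpre
  unfold Spec_greedy_country_match_py
  exact pv_main text country_variants hpre.1
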